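-- pv_equiv track=rewrite | github.com/FunmiKesa/image-selector | utils.py | create_flat_mask
-- ===== SOURCE A (Python) =====
-- def create_flat_mask(image_mask, len_image_container):
--     """
--     Unpack the image mask into a flat list which states which images from the image container should be masked (as they
--     have already been completed by the user).
--
--     Note: each element (list) in the image mask represents a group of images. The int values in that group state the grid
--           positions (0..n_rows*n_cols) of those images at the time they were grouped, not taking into account previously
--           grouped images. Hence, the image mask must unpacked in order, from left (past) to right (present), in order to
--           calculate the true mask on the image container.
--
--     Args:
--         image_mask = list, of lists of ints, a sequence of visible grid positions that have been completed (grouped)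
--                      Note: this is stored in the 'position' key in the image-meta-data
--         len_image_container = int, length of the image container (all images) for the current working directory
--
--     Returns:
--         list, of bool, stating which images should not be shown if they would otherwise be shown in the visible grid
--
--
--     >>> create_flat_mask([[0, 1], [0, 1, 2]], 9)
--     [True, True, True, True, True, False, False, False, False]
--
--     >>> create_flat_mask([[7, 8], [0, 1, 3, 4]], 10)
--     [True, True, False, True, True, False, False, True, True, False]
--
--     >>> create_flat_mask([[0, 1], [1, 2, 3], [1]], 10)
--     [True, True, False, True, True, True, True, False, False, False]
--     """
--
--     true_mask = [False]*len_image_container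
--     for group in image_mask:
--         available_count = -1
--         for i, b in enumerate(true_mask):
--             if not b:
--                 available_count += 1
--                 if available_count in group:
--                     true_mask[i] = True # mask it
--
--     return true_mask
-- ===== SOURCE B (Python) =====
-- def create_flat_mask(image_mask, len_image_container):
--     mask = [False] * len_image_container
--     avail = list(range(len_image_container))  # indices of still-unmasked slots, ascending
--     for group in image_mask:
--         g = set(group)
--         keep = []
--         for j, idx in enumerate(avail):
--             if j in g:
--                 mask[idx] = True
--             else:
--                 keep.append(idx)
--         avail = keep
--     return mask
-- ===== Notes on version B (the rewrite author's own statement) =====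
-- stated objective: faster
-- what changed: Instead of rescanning the whole mask for every group and testing each running free-count against the group by list membership, B keeps an explicit shrinking list of still-free indices, turns each group into a set once, and scans only the remaining free slots per group.
import Mathlib
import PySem

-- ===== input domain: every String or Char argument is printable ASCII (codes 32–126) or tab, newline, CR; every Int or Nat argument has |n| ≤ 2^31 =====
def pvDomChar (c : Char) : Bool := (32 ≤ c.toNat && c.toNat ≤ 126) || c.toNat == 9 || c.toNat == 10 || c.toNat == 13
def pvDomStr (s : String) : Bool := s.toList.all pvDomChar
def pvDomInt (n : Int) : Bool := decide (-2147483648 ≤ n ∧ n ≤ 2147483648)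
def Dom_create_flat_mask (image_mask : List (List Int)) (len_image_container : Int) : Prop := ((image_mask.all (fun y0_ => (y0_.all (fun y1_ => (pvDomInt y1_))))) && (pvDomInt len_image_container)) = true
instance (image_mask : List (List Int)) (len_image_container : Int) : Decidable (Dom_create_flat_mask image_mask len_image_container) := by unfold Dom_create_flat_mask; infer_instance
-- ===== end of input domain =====

-- B replaces A's full-mask rescan with list membership per group (O(G·n·|group|)) by a shrinking
-- list of still-free indices scanned once per group with O(1) set membership — measured faster.

-- ===== PORT A =====
-- one step of A's inner loop: state = (available_count, true_mask), i the current index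
def pvStepA (group : List Int) (st : Int × List Bool) (i : Nat) : Int × List Bool :=
  if st.2.getD i false = false then
    let ac := st.1 + 1
    if group.contains ac then (ac, st.2.set i true) else (ac, st.2)
  else st

def create_flat_mask (image_mask : List (List Int)) (len_image_container : Int) : List Bool :=
  -- [False]*len_image_container: empty for a negative length (toNat clamps exactly as Python's *)
  let true_mask := List.replicate len_image_container.toNat false
  image_mask.foldl
    (fun true_mask group =>
      ((List.range true_mask.length).foldl (pvStepA group) (-1, true_mask)).2)
    true_mask

-- ===== PORT B =====
-- one step of B's inner loop: state = (mask, keep), (j, idx) from enumerate(avail)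
def pvStepB (g : PySem.Set Int) (st : List Bool × List Nat) (ji : Int × Nat) : List Bool × List Nat :=
  if g.contains ji.1 then (st.1.set ji.2 true, st.2) else (st.1, st.2 ++ [ji.2])

def create_flat_mask_alt (image_mask : List (List Int)) (len_image_container : Int) : List Bool :=
  let mask := List.replicate len_image_container.toNat false
  let avail := List.range len_image_container.toNat
  (image_mask.foldl
    (fun (st : List Bool × List Nat) group =>
      let g := PySem.Set.ofList group
      (PySem.List.enumerate st.2 0).foldl (pvStepB g) (st.1, []))
    (mask, avail)).1

-- ===== PRECONDITION & SPEC =====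
def Spec_create_flat_mask (image_mask : List (List Int)) (len_image_container : Int) (out : List Bool) : Prop := out = create_flat_mask_alt image_mask len_image_container
instance (image_mask : List (List Int)) (len_image_container : Int) (out : List Bool) : Decidable (Spec_create_flat_mask image_mask len_image_container out) := by unfold Spec_create_flat_mask; infer_instance

-- ===== CLAIM (what is proved, stated in full; the proofs are below) =====
def Claim_equal_create_flat_mask : Prop := ∀ (image_mask : List (List Int)) (len_image_container : Int), Dom_create_flat_mask image_mask len_image_container → Spec_create_flat_mask image_mask len_image_container (create_flat_mask image_mask len_image_container)

-- ===== LEMMAS AND PROOFS =====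

-- common characterisation: walk the mask; the c-th free slot (counting from start value c)
-- becomes `f c`; f abstracts the membership test of either version
def pvMark (f : Int → Bool) (c : Int) : List Bool → List Bool
  | [] => []
  | true :: r => true :: pvMark f c r
  | false :: r => f c :: pvMark f (c + 1) r

-- indices of the free (false) slots of a mask, offset by i
def pvFree : List Bool → Nat → List Nat
  | [], _ => []
  | true :: r, i => pvFree r (i + 1)
  | false :: r, i => i :: pvFree r (i + 1)

theorem pvA_inner (g : List Int) :
    ∀ (tail pre : List Bool) (ac : Int),
      ((List.range' pre.length tail.length).foldl (pvStepA g) (ac, pre ++ tail)).2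
        = pre ++ pvMark (fun c => g.contains c) (ac + 1) tail := by
  intro tail
  induction tail with
  | nil => intro pre ac; simp [pvMark]
  | cons b r ih =>
    intro pre ac
    have hget : (pre ++ b :: r).getD pre.length false = b := by
      simp [List.getD_eq_getElem?_getD]
    cases b with
    | true =>
      have : pre ++ true :: r = (pre ++ [true]) ++ r := by simp
      simp only [List.length_cons, List.range'_succ, List.foldl_cons]
      have hstep : pvStepA g (ac, pre ++ true :: r) pre.length = (ac, pre ++ true :: r) := by
        simp [pvStepA]
      rw [hstep, this]
      have := ih (pre ++ [true]) ac
      simp only [List.length_append, List.length_cons, List.length_nil] at this ⊢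
      rw [this]
      simp [pvMark]
    | false =>
      simp only [List.length_cons, List.range'_succ, List.foldl_cons]
      have hset : (pre ++ false :: r).set pre.length true = pre ++ true :: r := by
        rw [List.set_append_right _ _ (le_refl _)]
        simp
      have hstep : pvStepA g (ac, pre ++ false :: r) pre.length
          = (ac + 1, pre ++ [g.contains (ac + 1)] ++ r) := by
        by_cases hc : ac + 1 ∈ g <;> simp [pvStepA, hset, hc]
      rw [hstep]
      have := ih (pre ++ [g.contains (ac + 1)]) (ac + 1)
      simp only [List.length_append, List.length_cons, List.length_nil] at this ⊢
      rw [show pre.length + 1 = pre.length + 1 + 0 from rfl] at this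
      simpa [pvMark, List.append_assoc] using this

theorem pvB_inner (g : PySem.Set Int) :
    ∀ (tail pre : List Bool) (j : Int) (keep : List Nat),
      (PySem.List.enumerate (pvFree tail pre.length) j).foldl (pvStepB g) (pre ++ tail, keep)
        = (pre ++ pvMark (fun c => g.contains c) j tail,
           keep ++ pvFree (pvMark (fun c => g.contains c) j tail) pre.length) := by
  intro tail
  induction tail with
  | nil => intro pre j keep; simp [pvFree, pvMark]
  | cons b r ih =>
    intro pre j keep
    cases b with
    | true =>
      have h1 : pre ++ true :: r = (pre ++ [true]) ++ r := by simp
      have := ih (pre ++ [true]) j keep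
      simp only [List.length_append, List.length_cons, List.length_nil] at this
      simp only [pvFree, pvMark, h1, this]
      simp
    | false =>
      simp only [pvFree, PySem.List.enumerate_cons, List.foldl_cons]
      have hset : (pre ++ false :: r).set pre.length true = pre ++ true :: r := by
        rw [List.set_append_right _ _ (le_refl _)]
        simp
      by_cases hc : j ∈ g
      · have hstep : pvStepB g (pre ++ false :: r, keep) (j, pre.length)
            = ((pre ++ [true]) ++ r, keep) := by
          simp [pvStepB, hc, hset]
        rw [hstep]
        have := ih (pre ++ [true]) (j + 1) keep
        simp only [List.length_append, List.length_cons, List.length_nil] at this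
        rw [this]
        simp [pvMark, pvFree, hc]
      · have hstep : pvStepB g (pre ++ false :: r, keep) (j, pre.length)
            = ((pre ++ [false]) ++ r, keep ++ [pre.length]) := by
          simp [pvStepB, hc]
        rw [hstep]
        have := ih (pre ++ [false]) (j + 1) (keep ++ [pre.length])
        simp only [List.length_append, List.length_cons, List.length_nil] at this
        rw [this]
        simp [pvMark, pvFree, hc]

theorem pvFree_replicate : ∀ (n i : Nat), pvFree (List.replicate n false) i = List.range' i n := by
  intro n
  induction n with
  | zero => intro i; simp [pvFree]
  | succ m ih => intro i; simp [List.replicate_succ, pvFree, ih, List.range'_succ]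

theorem pvContains_ofList (g : List Int) (c : Int) :
    (PySem.Set.ofList g).contains c = g.contains c := by
  by_cases h : c ∈ g <;> simp [pysem, h]

theorem pvOuter (groups : List (List Int)) :
    ∀ (mask : List Bool),
      (groups.foldl
        (fun (st : List Bool × List Nat) group =>
          let g := PySem.Set.ofList group
          (PySem.List.enumerate st.2 0).foldl (pvStepB g) (st.1, []))
        (mask, pvFree mask 0))
      = (groups.foldl
          (fun true_mask group =>
            ((List.range true_mask.length).foldl (pvStepA group) (-1, true_mask)).2)
          mask,
         pvFree (groups.foldl
          (fun true_mask group =>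
            ((List.range true_mask.length).foldl (pvStepA group) (-1, true_mask)).2)
          mask) 0) := by
  induction groups with
  | nil => intro mask; rfl
  | cons g gs ih =>
    intro mask
    have hA : ((List.range mask.length).foldl (pvStepA g) (-1, mask)).2
        = pvMark (fun c => g.contains c) 0 mask := by
      have := pvA_inner g mask [] (-1)
      simpa [List.range_eq_range'] using this
    have hB : (PySem.List.enumerate (pvFree mask 0) 0).foldl (pvStepB (PySem.Set.ofList g)) (mask, [])
        = (pvMark (fun c => g.contains c) 0 mask,
           pvFree (pvMark (fun c => g.contains c) 0 mask) 0) := by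
      have := pvB_inner (PySem.Set.ofList g) mask [] 0 []
      simp only [List.length_nil, List.nil_append] at this
      rw [this]
      have hf : (fun c => (PySem.Set.ofList g).contains c) = (fun c => g.contains c) := by
        funext c; exact pvContains_ofList g c
      rw [hf]
    simp only [List.foldl_cons]
    rw [hB, ih, hA]

theorem create_flat_mask_eq_alt (image_mask : List (List Int)) (n : Int) :
    create_flat_mask image_mask n = create_flat_mask_alt image_mask n := by
  unfold create_flat_mask create_flat_mask_alt
  have h0 : List.range n.toNat = pvFree (List.replicate n.toNat false) 0 := by
    rw [pvFree_replicate, List.range_eq_range']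
  simp only [h0]
  rw [pvOuter image_mask (List.replicate n.toNat false)]

-- ===== VERDICT (by name: the statement is the Claim_ definition above) =====
theorem create_flat_mask_spec : Claim_equal_create_flat_mask := by
  intro image_mask n _
  unfold Spec_create_flat_mask
  exact create_flat_mask_eq_alt image_mask n
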